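-- pv_equiv track=rewrite | github.com/jhzrocha/CNN2FPGA | Component Creator/Components/arvore_soma_conv.py | getSignalInitialization
-- ===== SOURCE A (Python) =====
-- def getSignalInitialization(qtInputs):
--     initialization = ''
--     wSumWithoutConnection = []
--     wEntradasWithoutConnection = []
--     qtUsedwSum = 0
--
--     for x in range(qtInputs):
--         initialization = initialization + f"            w_ENTRADAS({x})(i_DATA_WIDTH-1 downto 0) <= i_PORT_{x};\n"
--         wEntradasWithoutConnection.insert(0,x)
--     initialization = initialization + '\n'
--
--     for x in range(qtInputs):
--         initialization = initialization + f"            w_ENTRADAS({x})(31 downto 16) <= (others => '1') when (i_PORT_{x} (15) = '1') else (others => '0');\n"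
--
--     initialization = initialization + f"\n"
--     for x in range(0,qtInputs,2):
--         if x+1 > qtInputs-1:
--             break
--         else:
--             initialization = initialization + f"            w_SUM_OUT_{qtUsedwSum} <= STD_LOGIC_VECTOR(signed(w_ENTRADAS({x})) + signed(w_ENTRADAS({x+1})));\n"
--             wEntradasWithoutConnection.remove(x)
--             wEntradasWithoutConnection.remove(x+1)
--             wSumWithoutConnection.insert(0,qtUsedwSum)
--         qtUsedwSum = qtUsedwSum + 1
--     initialization = initialization + f"\n"
--
--     while qtUsedwSum+1 < qtInputs-1:
--         initialization = initialization + f"            w_SUM_OUT_{qtUsedwSum} <= STD_LOGIC_VECTOR(signed(w_SUM_OUT_{wSumWithoutConnection.pop()}) + signed(w_SUM_OUT_{wSumWithoutConnection.pop()}));\n"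
--         wSumWithoutConnection.insert(0,qtUsedwSum)
--         qtUsedwSum = qtUsedwSum + 1
--
--     initialization = initialization + f"\n"
--     if qtUsedwSum > 1:
--         if (len(wEntradasWithoutConnection) == 1 and len(wSumWithoutConnection) == 1):
--             initialization = initialization + f"            o_DATA <= STD_LOGIC_VECTOR(signed(w_SUM_OUT_{wSumWithoutConnection.pop()}) + signed(w_ENTRADAS({wEntradasWithoutConnection.pop()})));\n"
--         else:
--             initialization = initialization + f"            o_DATA <= STD_LOGIC_VECTOR(signed(w_SUM_OUT_{wSumWithoutConnection.pop()}) + signed(w_SUM_OUT_{wSumWithoutConnection.pop()}));\n"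
--     else:
--         initialization = initialization + f"            o_DATA <= signed(w_SUM_OUT_{qtUsedwSum-1});\n"
--
--
--     return initialization
-- ===== SOURCE B (Python) =====
-- def getSignalInitialization(qtInputs):
--     # Plan-then-render: compute the adder-tree shape by index arithmetic
--     # (no simulated connection lists), then render each record to VHDL.
--     m = max(qtInputs, 0) // 2          # number of input pairs
--     K = max(m, qtInputs - 2)           # total number of w_SUM_OUT signals
--
--     def ref(r):
--         kind, i = r
--         return f"w_ENTRADAS({i})" if kind == 'E' else f"w_SUM_OUT_{i}"
--
--     def assign(rec):
--         j, a, b = rec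
--         return f"            w_SUM_OUT_{j} <= STD_LOGIC_VECTOR(signed({ref(a)}) + signed({ref(b)}));\n"
--
--     loads = ''.join(f"            w_ENTRADAS({x})(i_DATA_WIDTH-1 downto 0) <= i_PORT_{x};\n"
--                     for x in range(qtInputs))
--     exts = ''.join(f"            w_ENTRADAS({x})(31 downto 16) <= (others => '1') when (i_PORT_{x} (15) = '1') else (others => '0');\n"
--                    for x in range(qtInputs))
--     pairs = [(j, ('E', 2 * j), ('E', 2 * j + 1)) for j in range(m)]
--     combines = [(j, ('S', 2 * (j - m)), ('S', 2 * (j - m) + 1)) for j in range(m, K)]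
--
--     if K > 1:
--         right = ('E', qtInputs - 1) if qtInputs % 2 == 1 else ('S', 2 * (K - m) + 1)
--         final = f"            o_DATA <= STD_LOGIC_VECTOR(signed({ref(('S', 2 * (K - m)))}) + signed({ref(right)}));\n"
--     else:
--         final = f"            o_DATA <= signed(w_SUM_OUT_{K - 1});\n"
--
--     return (loads + '\n' + exts + '\n' + ''.join(map(assign, pairs)) + '\n'
--             + ''.join(map(assign, combines)) + '\n' + final)
-- ===== Notes on version B (the rewrite author's own statement) =====
-- stated objective: alternative
-- what changed: Replaces A's stateful simulation of connection lists (insert(0)/remove/pop on wEntradas/wSumWithoutConnection plus a while loop) by closed-form index arithmetic: the pair count m and sum count K are computed directly, pair/combine records are generated as comprehensions (combine j reads w_SUM_OUT_{2(j-m)} and w_SUM_OUT_{2(j-m)+1}), and a separate rendering pass turns records into VHDL lines.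
import Mathlib
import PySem

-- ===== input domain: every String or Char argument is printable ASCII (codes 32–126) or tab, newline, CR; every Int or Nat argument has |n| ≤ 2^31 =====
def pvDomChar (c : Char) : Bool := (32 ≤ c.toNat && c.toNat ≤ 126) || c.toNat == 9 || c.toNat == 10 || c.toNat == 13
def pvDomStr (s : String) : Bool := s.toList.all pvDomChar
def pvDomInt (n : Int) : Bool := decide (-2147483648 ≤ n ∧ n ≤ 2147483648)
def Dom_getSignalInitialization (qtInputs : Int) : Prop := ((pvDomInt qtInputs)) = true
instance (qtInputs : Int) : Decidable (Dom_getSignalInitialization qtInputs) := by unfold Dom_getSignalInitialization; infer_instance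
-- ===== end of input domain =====

-- B replaces A's simulated connection lists (insert(0)/remove/pop and a while loop)
-- by a plan built with closed-form index arithmetic that is then rendered to VHDL lines
-- (objective: alternative; same value everywhere).

-- ===== PORT A =====
def pvA_loadLine (x : Int) : String :=
  "            w_ENTRADAS(" ++ PySem.Int.toStr x ++ ")(i_DATA_WIDTH-1 downto 0) <= i_PORT_" ++ PySem.Int.toStr x ++ ";\n"

def pvA_extLine (x : Int) : String :=
  "            w_ENTRADAS(" ++ PySem.Int.toStr x ++ ")(31 downto 16) <= (others => '1') when (i_PORT_" ++ PySem.Int.toStr x ++ " (15) = '1') else (others => '0');\n"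

def pvA_pairLine (q x : Int) : String :=
  "            w_SUM_OUT_" ++ PySem.Int.toStr q ++ " <= STD_LOGIC_VECTOR(signed(w_ENTRADAS(" ++ PySem.Int.toStr x ++ ")) + signed(w_ENTRADAS(" ++ PySem.Int.toStr (x+1) ++ ")));\n"

def pvA_sumLine (q a b : Int) : String :=
  "            w_SUM_OUT_" ++ PySem.Int.toStr q ++ " <= STD_LOGIC_VECTOR(signed(w_SUM_OUT_" ++ PySem.Int.toStr a ++ ") + signed(w_SUM_OUT_" ++ PySem.Int.toStr b ++ "));\n"

-- `for x in range(0, qtInputs, 2): if x+1 > qtInputs-1: break else: …` as counting recursion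
def pvA_pairLoop (n x : Int) (s : String) (wE wS : List Int) (k : Int) : String × List Int × List Int × Int :=
  if x < n then
    if x + 1 > n - 1 then (s, wE, wS, k)
    else
      pvA_pairLoop n (x + 2) (s ++ pvA_pairLine k x)
        ((PySem.List.remove? ((PySem.List.remove? wE x).getD wE) (x+1)).getD ((PySem.List.remove? wE x).getD wE))
        (PySem.List.insert wS 0 k) (k + 1)
  else (s, wE, wS, k)
termination_by (n - x).toNat
decreasing_by omega

-- `while qtUsedwSum+1 < qtInputs-1: …`; .pop() is PySem.List.pop? (A never pops empty, .getD is the unreachable-default)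
def pvA_whileLoop (n : Int) (s : String) (wS : List Int) (k : Int) : String × List Int × Int :=
  if k + 1 < n - 1 then
    pvA_whileLoop n
      (s ++ pvA_sumLine k ((PySem.List.pop? wS).getD (0, wS)).1
        ((PySem.List.pop? ((PySem.List.pop? wS).getD (0, wS)).2).getD
          (0, ((PySem.List.pop? wS).getD (0, wS)).2)).1)
      (PySem.List.insert
        ((PySem.List.pop? ((PySem.List.pop? wS).getD (0, wS)).2).getD
          (0, ((PySem.List.pop? wS).getD (0, wS)).2)).2 0 k)
      (k + 1)
  else (s, wS, k)
termination_by (n - 1 - k).toNat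
decreasing_by omega

def getSignalInitialization (qtInputs : Int) : String :=
  let st1 := (PySem.List.pyRange 0 qtInputs).foldl
      (fun (p : String × List Int) x => (p.1 ++ pvA_loadLine x, PySem.List.insert p.2 0 x)) ("", [])
  let s1 := st1.1 ++ "\n"
  let s2 := ((PySem.List.pyRange 0 qtInputs).foldl (fun s x => s ++ pvA_extLine x) s1) ++ "\n"
  let st3 := pvA_pairLoop qtInputs 0 s2 st1.2 [] 0
  let st4 := pvA_whileLoop qtInputs (st3.1 ++ "\n") st3.2.2.1 st3.2.2.2
  let s4 := st4.1 ++ "\n"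
  let wE := st3.2.1
  let wS := st4.2.1
  let k := st4.2.2
  if k > 1 then
    if wE.length = 1 ∧ wS.length = 1 then
      s4 ++ "            o_DATA <= STD_LOGIC_VECTOR(signed(w_SUM_OUT_" ++ PySem.Int.toStr (((PySem.List.pop? wS).getD (0, wS)).1) ++ ") + signed(w_ENTRADAS(" ++ PySem.Int.toStr (((PySem.List.pop? wE).getD (0, wE)).1) ++ ")));\n"
    else
      s4 ++ "            o_DATA <= STD_LOGIC_VECTOR(signed(w_SUM_OUT_" ++ PySem.Int.toStr (((PySem.List.pop? wS).getD (0, wS)).1) ++ ") + signed(w_SUM_OUT_" ++ PySem.Int.toStr (((PySem.List.pop? (((PySem.List.pop? wS).getD (0, wS)).2)).getD (0, ((PySem.List.pop? wS).getD (0, wS)).2)).1) ++ "));\n"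
  else
    s4 ++ "            o_DATA <= signed(w_SUM_OUT_" ++ PySem.Int.toStr (k - 1) ++ ");\n"

-- ===== PORT B =====
def pvB_ref (r : Bool × Int) : String :=
  if r.1 then "w_ENTRADAS(" ++ PySem.Int.toStr r.2 ++ ")" else "w_SUM_OUT_" ++ PySem.Int.toStr r.2

def pvB_assign (rec : Int × (Bool × Int) × (Bool × Int)) : String :=
  "            w_SUM_OUT_" ++ PySem.Int.toStr rec.1 ++ " <= STD_LOGIC_VECTOR(signed(" ++ pvB_ref rec.2.1 ++ ") + signed(" ++ pvB_ref rec.2.2 ++ "));\n"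

def pvB_loadLine (x : Int) : String :=
  "            w_ENTRADAS(" ++ PySem.Int.toStr x ++ ")(i_DATA_WIDTH-1 downto 0) <= i_PORT_" ++ PySem.Int.toStr x ++ ";\n"

def pvB_extLine (x : Int) : String :=
  "            w_ENTRADAS(" ++ PySem.Int.toStr x ++ ")(31 downto 16) <= (others => '1') when (i_PORT_" ++ PySem.Int.toStr x ++ " (15) = '1') else (others => '0');\n"

def getSignalInitialization_alt (qtInputs : Int) : String :=
  let m := PySem.Int.floordiv (max qtInputs 0) 2
  let K := max m (qtInputs - 2)
  let loads := PySem.Str.join "" ((PySem.List.pyRange 0 qtInputs).map pvB_loadLine)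
  let exts := PySem.Str.join "" ((PySem.List.pyRange 0 qtInputs).map pvB_extLine)
  let pairs := (PySem.List.pyRange 0 m).map (fun j => (j, ((true, 2*j), (true, 2*j+1))))
  let combines := (PySem.List.pyRange m K).map (fun j => (j, ((false, 2*(j-m)), (false, 2*(j-m)+1))))
  let final :=
    if K > 1 then
      let right := if PySem.Int.mod qtInputs 2 = 1 then (true, qtInputs - 1) else (false, 2*(K-m)+1)
      "            o_DATA <= STD_LOGIC_VECTOR(signed(" ++ pvB_ref (false, 2*(K-m)) ++ ") + signed(" ++ pvB_ref right ++ "));\n"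
    else
      "            o_DATA <= signed(w_SUM_OUT_" ++ PySem.Int.toStr (K - 1) ++ ");\n"
  loads ++ "\n" ++ exts ++ "\n" ++ PySem.Str.join "" (pairs.map pvB_assign) ++ "\n"
    ++ PySem.Str.join "" (combines.map pvB_assign) ++ "\n" ++ final

-- ===== PRECONDITION & SPEC =====
def Spec_getSignalInitialization (qtInputs : Int) (out : String) : Prop := out = getSignalInitialization_alt qtInputs
instance (qtInputs : Int) (out : String) : Decidable (Spec_getSignalInitialization qtInputs out) := by unfold Spec_getSignalInitialization; infer_instance

-- ===== CLAIM (what is proved, stated in full; the proofs are below) =====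
def Claim_equal_getSignalInitialization : Prop := ∀ (qtInputs : Int), Dom_getSignalInitialization qtInputs → Spec_getSignalInitialization qtInputs (getSignalInitialization qtInputs)

-- ===== LEMMAS AND PROOFS =====

-- number of input pairs m and total sum-signal count K, as B computes them
def pvM (n : Int) : Int := PySem.Int.floordiv (max n 0) 2
def pvK (n : Int) : Int := max (pvM n) (n - 2)

lemma pvM_bounds (n : Int) : 0 ≤ pvM n ∧ 2 * pvM n ≤ max n 0 ∧ max n 0 ≤ 2 * pvM n + 1 := by
  unfold pvM
  rw [PySem.Int.floordiv_eq_ediv_of_pos (by norm_num)]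
  omega

lemma pv_app3 {a b c : String} (u : String) (h : a ++ b = c) : a ++ (b ++ u) = c ++ u := by
  rw [← String.append_assoc, h]

lemma pv_join_nil : PySem.Str.join "" ([] : List String) = "" := by
  simp [PySem.Str.join]

lemma pv_join_cons (a : String) (l : List String) :
    PySem.Str.join "" (a :: l) = a ++ PySem.Str.join "" l := by
  cases l with
  | nil => simp [PySem.Str.join, PySem.Chars.join_singleton]
  | cons b t => simp [PySem.Str.join, PySem.Chars.join_cons_cons]

lemma pv_foldl_append (f : Int → String) :
    ∀ (l : List Int) (s : String),
      l.foldl (fun acc x => acc ++ f x) s = s ++ PySem.Str.join "" (l.map f) := by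
  intro l
  induction l with
  | nil => intro s; simp [pv_join_nil]
  | cons a t ih => intro s; simp [List.foldl_cons, ih, pv_join_cons, String.append_assoc]

lemma pv_foldl_insert0 :
    ∀ (l wE : List Int),
      l.foldl (fun acc x => PySem.List.insert acc 0 x) wE = l.reverse ++ wE := by
  intro l
  induction l with
  | nil => intro wE; simp
  | cons a t ih => intro wE; rw [List.foldl_cons, PySem.List.insert_zero, ih]; simp

lemma pv_rev_snoc (a b : Int) (h : a ≤ b) :
    (PySem.List.pyRange a (b+1)).reverse = b :: (PySem.List.pyRange a b).reverse := by
  rw [PySem.List.pyRange_one_succ_right h]; simp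

lemma pv_remove_rev (a b : Int) (h : a < b) :
    PySem.List.remove? ((PySem.List.pyRange a b).reverse) a
      = some ((PySem.List.pyRange (a+1) b).reverse) := by
  have hm : a ∈ (PySem.List.pyRange a b).reverse := by
    rw [List.mem_reverse, PySem.List.mem_pyRange_one]; omega
  rw [PySem.List.remove?_eq_some_erase _ a hm]
  congr 1
  rw [PySem.List.pyRange_one_cons h]
  simp only [List.reverse_cons]
  rw [List.erase_append_right [a]
    (by rw [List.mem_reverse, PySem.List.mem_pyRange_one]; omega)]
  simp

lemma pv_pop_rev (a b : Int) (h : a < b) :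
    PySem.List.pop? ((PySem.List.pyRange a b).reverse)
      = some (a, (PySem.List.pyRange (a+1) b).reverse) := by
  rw [PySem.List.pyRange_one_cons h]
  simp only [List.reverse_cons]
  exact PySem.List.pop?_last _ a

lemma pv_pairLoop_spec (n : Int) :
    ∀ (d : Nat) (k : Int) (s : String), 0 ≤ k → k ≤ pvM n → (pvM n - k).toNat = d →
      pvA_pairLoop n (2*k) s ((PySem.List.pyRange (2*k) n).reverse) ((PySem.List.pyRange 0 k).reverse) k
      = (s ++ PySem.Str.join "" ((PySem.List.pyRange k (pvM n)).map (fun j => pvA_pairLine j (2*j))),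
         (PySem.List.pyRange (2*(pvM n)) n).reverse, (PySem.List.pyRange 0 (pvM n)).reverse, pvM n) := by
  have hM := pvM_bounds n
  intro d
  induction d with
  | zero =>
    intro k s hk hkM hd
    have hkM' : k = pvM n := by omega
    subst hkM'
    rw [pvA_pairLoop]
    rw [PySem.List.pyRange_one_eq_nil (le_refl (pvM n))]
    simp only [List.map_nil, pv_join_nil, String.append_empty]
    by_cases hx : 2 * pvM n < n
    · have hb : 2 * pvM n + 1 > n - 1 := by omega
      simp only [if_pos hx, if_pos hb]
    · simp only [if_neg hx]
  | succ d ih =>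
    intro k s hk hkM hd
    have hlt : k < pvM n := by omega
    have hx : 2*k < n := by omega
    have hnb : ¬ (2*k + 1 > n - 1) := by omega
    rw [pvA_pairLoop]
    simp only [if_pos hx, if_neg hnb]
    rw [pv_remove_rev (2*k) n (by omega)]
    simp only [Option.getD_some]
    rw [pv_remove_rev (2*k+1) n (by omega)]
    simp only [Option.getD_some, PySem.List.insert_zero]
    rw [show ((2*k+1 : Int) + 1) = 2*(k+1) from by ring,
        show ((2*k : Int) + 2) = 2*(k+1) from by ring,
        show (k :: (PySem.List.pyRange 0 k).reverse) = (PySem.List.pyRange 0 (k+1)).reverse from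
          (pv_rev_snoc 0 k hk).symm]
    rw [ih (k+1) (s ++ pvA_pairLine k (2*k)) (by omega) (by omega) (by omega)]
    rw [PySem.List.pyRange_one_cons hlt]
    simp [pv_join_cons, String.append_assoc]

lemma pv_whileLoop_spec (n : Int) :
    ∀ (d : Nat) (k : Int) (s : String), pvM n ≤ k → k ≤ pvK n → (pvK n - k).toNat = d →
      pvA_whileLoop n s ((PySem.List.pyRange (2*(k - pvM n)) k).reverse) k
      = (s ++ PySem.Str.join "" ((PySem.List.pyRange k (pvK n)).map
            (fun j => pvA_sumLine j (2*(j - pvM n)) (2*(j - pvM n)+1))),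
         (PySem.List.pyRange (2*(pvK n - pvM n)) (pvK n)).reverse, pvK n) := by
  have hM := pvM_bounds n
  have hK : pvK n = max (pvM n) (n - 2) := rfl
  intro d
  induction d with
  | zero =>
    intro k s hk hkK hd
    have hkK' : k = pvK n := by omega
    subst hkK'
    rw [pvA_whileLoop]
    have hng : ¬ (pvK n + 1 < n - 1) := by omega
    simp only [if_neg hng]
    rw [PySem.List.pyRange_one_eq_nil (le_refl (pvK n))]
    simp [pv_join_nil]
  | succ d ih =>
    intro k s hk hkK hd
    have hlt : k < pvK n := by omega
    have hcont : k + 1 < n - 1 := by omega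
    have hn0 : 0 < n := by omega
    have ha : 2*(k - pvM n) < k := by omega
    have ha2 : 2*(k - pvM n) + 1 < k := by omega
    rw [pvA_whileLoop]
    simp only [if_pos hcont]
    rw [pv_pop_rev _ _ ha]
    simp only [Option.getD_some]
    rw [pv_pop_rev _ _ ha2]
    simp only [Option.getD_some, PySem.List.insert_zero]
    rw [show (k :: (PySem.List.pyRange (2*(k - pvM n)+1+1) k).reverse)
          = (PySem.List.pyRange (2*(k - pvM n)+1+1) (k+1)).reverse from
        (pv_rev_snoc _ k (by omega)).symm,
        show ((2*(k - pvM n) + 1 + 1 : Int)) = 2*((k+1) - pvM n) from by ring]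
    rw [ih (k+1) _ (by omega) (by omega) (by omega)]
    rw [PySem.List.pyRange_one_cons hlt]
    simp [pv_join_cons, String.append_assoc]

lemma pv_line_load : pvA_loadLine = pvB_loadLine := rfl

lemma pv_line_ext : pvA_extLine = pvB_extLine := rfl

lemma pv_line_pair (j : Int) :
    pvB_assign (j, ((true, 2*j), (true, 2*j+1))) = pvA_pairLine j (2*j) := by
  simp only [pvB_assign, pvB_ref, pvA_pairLine, if_pos, String.append_assoc]
  rw [show (((")" : String)) ++ "));\n") = ")));\n" from rfl]
  rw [pv_app3 _ (show ((")" : String) ++ ") + signed(") = ")) + signed(" from rfl)]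
  rw [pv_app3 _ (show ((")) + signed(" : String) ++ "w_ENTRADAS(") = ")) + signed(w_ENTRADAS(" from rfl)]
  rw [pv_app3 _ (show ((" <= STD_LOGIC_VECTOR(signed(" : String) ++ "w_ENTRADAS(")
        = " <= STD_LOGIC_VECTOR(signed(w_ENTRADAS(" from rfl)]

lemma pv_line_sum (j a : Int) :
    pvB_assign (j, ((false, a), (false, a+1))) = pvA_sumLine j a (a+1) := by
  simp only [pvB_assign, pvB_ref, pvA_sumLine, String.append_assoc, Bool.false_eq_true,
    ite_false]
  rw [pv_app3 _ (show ((") + signed(" : String) ++ "w_SUM_OUT_") = ") + signed(w_SUM_OUT_" from rfl)]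
  rw [pv_app3 _ (show ((" <= STD_LOGIC_VECTOR(signed(" : String) ++ "w_SUM_OUT_")
        = " <= STD_LOGIC_VECTOR(signed(w_SUM_OUT_" from rfl)]

-- ===== VERDICT (by name: the statement is the Claim_ definition above) =====
theorem getSignalInitialization_spec : Claim_equal_getSignalInitialization := by
  unfold Claim_equal_getSignalInitialization Spec_getSignalInitialization
  intro n _
  have hM := pvM_bounds n
  -- evaluate port A
  simp only [getSignalInitialization]
  rw [PySem.List.foldl_prod_mk (f := fun s x => s ++ pvA_loadLine x)
        (g := fun l x => PySem.List.insert l 0 x)]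
  simp only [pv_foldl_append, pv_foldl_insert0, List.append_nil, String.empty_append]
  have hpair := pv_pairLoop_spec n (pvM n).toNat 0
  simp only [mul_zero, PySem.List.pyRange_one_eq_nil (le_refl (0:Int)), List.reverse_nil] at hpair
  rw [hpair _ (le_refl 0) hM.1 (by omega)]
  dsimp only
  have hwhile := pv_whileLoop_spec n (pvK n - pvM n).toNat (pvM n)
  simp only [sub_self, mul_zero] at hwhile
  rw [hwhile _ (le_refl _) (le_max_left _ _) trivial]
  dsimp only
  -- evaluate port B
  simp only [getSignalInitialization_alt]
  rw [show PySem.Int.floordiv (max n 0) 2 = pvM n from rfl]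
  rw [show (max (pvM n) (n - 2)) = pvK n from rfl]
  simp only [List.map_map]
  have hpl : ((PySem.List.pyRange 0 (pvM n)).map
      (pvB_assign ∘ fun j => (j, ((true, 2*j), (true, 2*j+1)))))
      = (PySem.List.pyRange 0 (pvM n)).map (fun j => pvA_pairLine j (2*j)) := by
    apply List.map_congr_left; intro j _; exact pv_line_pair j
  have hcl : ((PySem.List.pyRange (pvM n) (pvK n)).map
      (pvB_assign ∘ fun j => (j, ((false, 2*(j - pvM n)), (false, 2*(j - pvM n)+1)))))
      = (PySem.List.pyRange (pvM n) (pvK n)).map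
          (fun j => pvA_sumLine j (2*(j - pvM n)) (2*(j - pvM n)+1)) := by
    apply List.map_congr_left; intro j _; exact pv_line_sum j (2*(j - pvM n))
  rw [hpl, hcl]
  rw [pv_line_load, pv_line_ext]
  -- final o_DATA line
  by_cases hK1 : pvK n > 1
  · have hKM : pvK n = max (pvM n) (n - 2) := rfl
    have hn4 : 4 ≤ n := by omega
    have hmax : max n 0 = n := by omega
    rw [hmax] at hM
    have hlenE : ((PySem.List.pyRange (2*(pvM n)) n).reverse).length = (n - 2*(pvM n)).toNat := by
      simp [PySem.List.length_pyRange_one]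
    have hlenS : ((PySem.List.pyRange (2*(pvK n - pvM n)) (pvK n)).reverse).length
        = (pvK n - 2*(pvK n - pvM n)).toNat := by
      simp [PySem.List.length_pyRange_one]
    have hmodeq := PySem.Int.mod_eq_emod_of_pos (a := n) (b := 2) (by norm_num)
    simp only [if_pos hK1]
    rcases PySem.Int.mod_two_eq n with hmod | hmod
    · -- n even: the o_DATA line adds the last two partial sums
      have heven : n = 2 * pvM n := by omega
      have hE0 : ¬ (((PySem.List.pyRange (2*(pvM n)) n).reverse).length = 1 ∧
          ((PySem.List.pyRange (2*(pvK n - pvM n)) (pvK n)).reverse).length = 1) := by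
        rw [hlenE]; omega
      rw [if_neg hE0]
      rw [pv_pop_rev _ _ (by omega)]
      simp only [Option.getD_some]
      rw [pv_pop_rev (2*(pvK n - pvM n)+1) (pvK n) (by omega)]
      simp only [Option.getD_some]
      have hmodn : ¬ (PySem.Int.mod n 2 = 1) := by omega
      rw [if_neg hmodn]
      simp only [pvB_ref, Bool.false_eq_true, ite_false, String.append_assoc]
      rw [pv_app3 _ (show ((") + signed(" : String) ++ "w_SUM_OUT_") = ") + signed(w_SUM_OUT_" from rfl)]
      rw [pv_app3 _ (show (("            o_DATA <= STD_LOGIC_VECTOR(signed(" : String) ++ "w_SUM_OUT_")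
            = "            o_DATA <= STD_LOGIC_VECTOR(signed(w_SUM_OUT_" from rfl)]
    · -- n odd: the o_DATA line adds the last partial sum and the unpaired input
      have hodd : n = 2 * pvM n + 1 := by omega
      have hE1 : (((PySem.List.pyRange (2*(pvM n)) n).reverse).length = 1 ∧
          ((PySem.List.pyRange (2*(pvK n - pvM n)) (pvK n)).reverse).length = 1) := by
        rw [hlenE, hlenS]; omega
      rw [if_pos hE1]
      rw [pv_pop_rev (2*(pvK n - pvM n)) (pvK n) (by omega)]
      rw [pv_pop_rev (2*(pvM n)) n (by omega)]
      simp only [Option.getD_some]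
      rw [if_pos hmod]
      simp only [pvB_ref, Bool.false_eq_true, ite_false, if_pos, String.append_assoc]
      rw [show (2*(pvM n) : Int) = n - 1 from by omega]
      rw [show (((")" : String)) ++ "));\n") = ")));\n" from rfl]
      rw [pv_app3 _ (show ((") + signed(" : String) ++ "w_ENTRADAS(") = ") + signed(w_ENTRADAS(" from rfl)]
      rw [pv_app3 _ (show (("            o_DATA <= STD_LOGIC_VECTOR(signed(" : String) ++ "w_SUM_OUT_")
            = "            o_DATA <= STD_LOGIC_VECTOR(signed(w_SUM_OUT_" from rfl)]
  · rw [if_neg hK1, if_neg hK1]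
    simp [String.append_assoc]
    rw [pv_app3 (PySem.Int.toStr (pvK n - 1) ++ ");\n")
      (show ("\n" : String) ++ "            o_DATA <= signed(w_SUM_OUT_"
         = "\n            o_DATA <= signed(w_SUM_OUT_" from rfl)]
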